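-- pv_equiv track=rewrite | github.com/samuelleyton2006/Estudio-20-De-Octubre---Estructuras-De-Datos-Lineales- | EjerciciosEnPython.py | es_forma_XY_cola
-- ===== SOURCE A (Python) =====
-- from collections import deque
--
-- def es_forma_XY_cola(cadena):
--     cola = deque()
--     parte1, parte2 = cadena.split('&')
--     for letra in parte1:
--         cola.append(letra)
--     for letra in parte2:
--         if not cola or cola.pop() != letra:
--             return "NO PERTENECE A LA FORMA X&Y"
--     return "SI PERTENECE A LA FORMA X&Y"
-- ===== SOURCE B (Python) =====
-- def es_forma_XY_cola(cadena):
--     parte1, parte2 = cadena.split('&')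
--     if parte1[::-1][:len(parte2)] == parte2:
--         return "SI PERTENECE A LA FORMA X&Y"
--     return "NO PERTENECE A LA FORMA X&Y"
-- ===== Notes on version B (the rewrite author's own statement) =====
-- stated objective: simpler
-- what changed: Replaces the deque push/pop loop with a single comparison of parte2 against the reversal of parte1 truncated to len(parte2); no stack is maintained.
import Mathlib
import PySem

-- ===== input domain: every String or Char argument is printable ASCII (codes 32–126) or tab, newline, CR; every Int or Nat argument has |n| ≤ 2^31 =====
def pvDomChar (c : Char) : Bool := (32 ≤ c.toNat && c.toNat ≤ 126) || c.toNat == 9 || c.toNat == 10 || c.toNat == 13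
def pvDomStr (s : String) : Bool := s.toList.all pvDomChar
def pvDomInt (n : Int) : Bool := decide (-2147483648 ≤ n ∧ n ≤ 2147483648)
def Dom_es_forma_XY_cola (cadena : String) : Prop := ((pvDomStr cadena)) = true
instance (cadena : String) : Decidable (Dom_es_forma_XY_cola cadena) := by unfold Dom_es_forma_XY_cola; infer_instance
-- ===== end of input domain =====

-- B replaces A's stack push/pop loop by one reversed-slice comparison (objective: simpler).

-- ===== PORT A =====
-- the second for-loop of A: pop from the end of `cola`, compare with each letter
def esACheck : List Char → List Char → String
  | _, [] => "SI PERTENECE A LA FORMA X&Y"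
  | cola, l :: ls =>
      if h : cola = [] then "NO PERTENECE A LA FORMA X&Y"
      else if cola.getLast h ≠ l then "NO PERTENECE A LA FORMA X&Y"
      else esACheck cola.dropLast ls

def es_forma_XY_cola (cadena : String) : String :=
  match (PySem.Str.split? cadena "&").getD [] with
  | [parte1, parte2] =>
      -- first for-loop: push each letter of parte1 onto the stack
      let cola := parte1.toList.foldl (fun c letra => c ++ [letra]) []
      esACheck cola parte2.toList
  | _ => ""   -- Python raises ValueError (unpacking); excluded by Pre_

-- ===== PORT B =====
def es_forma_XY_cola_alt (cadena : String) : String :=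
  let parts := (PySem.Str.split? cadena "&").getD []
  if parts.length = 2 then       -- 'parte1, parte2 = …' unpacking
    let parte1 := parts.headD ""
    let parte2 := (parts.drop 1).headD ""
    let rev := (PySem.Str.slice? parte1 none none (-1)).getD ""      -- parte1[::-1]
    if PySem.Str.slice rev none (some (PySem.Str.len parte2)) = parte2 then
      "SI PERTENECE A LA FORMA X&Y"
    else
      "NO PERTENECE A LA FORMA X&Y"
  else ""   -- Python raises ValueError (unpacking); excluded by Pre_

-- ===== PRECONDITION & SPEC =====
-- A raises ValueError (tuple unpacking) unless cadena contains exactly one '&'.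
def Pre_es_forma_XY_cola (cadena : String) : Prop :=
  ((PySem.Str.split? cadena "&").getD []).length = 2
instance (cadena : String) : Decidable (Pre_es_forma_XY_cola cadena) := by
  unfold Pre_es_forma_XY_cola; infer_instance
def pvWitness_es_forma_XY_cola : String := "ab&ba"

def Spec_es_forma_XY_cola (cadena : String) (out : String) : Prop := out = es_forma_XY_cola_alt cadena
instance (cadena : String) (out : String) : Decidable (Spec_es_forma_XY_cola cadena out) := by unfold Spec_es_forma_XY_cola; infer_instance

-- ===== CLAIM (what is proved, stated in full; the proofs are below) =====
def Claim_equal_es_forma_XY_cola : Prop := ∀ (cadena : String), Dom_es_forma_XY_cola cadena → Pre_es_forma_XY_cola cadena → Spec_es_forma_XY_cola cadena (es_forma_XY_cola cadena)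

-- ===== LEMMAS AND PROOFS =====

-- pushing each element onto the back rebuilds the list
theorem foldl_append_singleton_id (l : List Char) :
    l.foldl (fun c letra => c ++ [letra]) [] = l := by
  simpa using PySem.List.foldl_append_singleton_eq_map (f := id) (l := l) (acc := ([] : List Char))

-- the pop loop answers exactly "is ys the reversal of the last |ys| elements of cola"
theorem esACheck_eq (ys : List Char) : ∀ (cola : List Char),
    esACheck cola ys =
      (if cola.reverse.take ys.length = ys then "SI PERTENECE A LA FORMA X&Y"
       else "NO PERTENECE A LA FORMA X&Y") := by
  induction ys with
  | nil => intro cola; simp [esACheck]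
  | cons y ys ih =>
    intro cola
    rcases h : cola.reverse with _ | ⟨c, cs⟩
    · have hc : cola = [] := by simpa using congrArg List.reverse h
      subst hc; simp [esACheck]
    · have hc : cola = (c :: cs).reverse := by
        have := congrArg List.reverse h; simpa using this
      subst hc
      have hne : (c :: cs).reverse ≠ [] := by simp
      have hlast : ((c :: cs).reverse).getLast hne = c := by
        simp
      have hdrop : ((c :: cs).reverse).dropLast = cs.reverse := by
        simp
      rw [esACheck, dif_neg hne, hlast, hdrop, ih]
      by_cases hcy : c = y
      · subst hcy; simp
      · simp [hcy]

theorem es_forma_XY_cola_spec : Claim_equal_es_forma_XY_cola := by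
  intro cadena _ hpre
  unfold Pre_es_forma_XY_cola at hpre
  unfold Spec_es_forma_XY_cola es_forma_XY_cola es_forma_XY_cola_alt
  rcases hs : (PySem.Str.split? cadena "&").getD [] with _ | ⟨p1, _ | ⟨p2, rest⟩⟩
  · rw [hs] at hpre; simp at hpre
  · rw [hs] at hpre; simp at hpre
  · rcases rest with _ | ⟨r, rs⟩
    · simp only
      rw [foldl_append_singleton_id, esACheck_eq]
      simp only [List.length_cons, List.length_nil, Nat.reduceAdd, reduceIte,
        List.headD_cons, List.drop_succ_cons, List.drop_zero]
      have hrev : (PySem.Str.slice? p1 none none (-1)).getD "" =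
          String.ofList p1.toList.reverse := by
        rw [PySem.Str.slice?_none_none_neg_one]; rfl
      simp only [hrev]
      have hsl : (PySem.Str.slice (String.ofList p1.toList.reverse) none
            (some (PySem.Str.len p2))).toList = p1.toList.reverse.take p2.toList.length := by
        simp [PySem.Str.toList_slice, PySem.Chars.slice_eq_listSlice, PySem.Str.len]
      by_cases h : p1.toList.reverse.take p2.toList.length = p2.toList
      · rw [if_pos h, if_pos]
        apply String.toList_injective
        rw [hsl, h]
      · rw [if_neg h, if_neg]
        intro hc
        exact h (by rw [← hsl, hc])
    · rw [hs] at hpre; simp at hpre
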